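-- pv_equiv track=rewrite | github.com/mto9902/SheetMusicGenerator | backend/app/generator/_texture.py | _soften_static_path
-- ===== SOURCE A (Python) =====
-- def _clamp_pool_index(index_value: int, pool_length: int) -> int:
--     return max(0, min(pool_length - 1, index_value))
--
-- def _soften_static_path(
--     path_indices: list[int],
--     pool_length: int,
--     preferred_direction: int,
-- ) -> list[int]:
--     if len(path_indices) < 3:
--         return path_indices
--
--     softened = list(path_indices)
--     direction = preferred_direction if preferred_direction != 0 else 1
--     run_start = 0
--     while run_start < len(softened):
--         run_end = run_start + 1
--         while run_end < len(softened) and softened[run_end] == softened[run_start]: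
--             run_end += 1
--         run_length = run_end - run_start
--         if run_length > 2:
--             base_index = softened[run_start]
--             alternate = _clamp_pool_index(base_index + direction, pool_length)
--             if alternate == base_index:
--                 alternate = _clamp_pool_index(base_index - direction, pool_length)
--             if alternate != base_index:
--                 for position in range(run_start + 1, run_end - 1, 2):
--                     softened[position] = alternate
--         run_start = run_end
--     return softened
-- ===== SOURCE B (Python) =====
-- def _soften_static_path(path_indices, pool_length, preferred_direction):
--     n = len(path_indices)
--     if n < 3:
--         return path_indices
--     step = preferred_direction or 1
--
--     # pass 1: start-of-run index for every position
--     start = [0]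
--     for i in range(1, n):
--         start.append(start[-1] if path_indices[i] == path_indices[i - 1] else i)
--
--     # pass 2: end-of-run index (inclusive) for every position
--     end = [n - 1]
--     for i in range(n - 2, -1, -1):
--         end.append(end[-1] if path_indices[i] == path_indices[i + 1] else i)
--     end.reverse()
--
--     def alternate(v):
--         a = max(0, min(pool_length - 1, v + step))
--         if a == v:
--             a = max(0, min(pool_length - 1, v - step))
--         return a
--
--     # pass 3: elementwise decision from per-position run boundaries
--     return [alternate(v) if start[i] < i < end[i] and (i - start[i]) % 2 == 1
--             and alternate(v) != v else v
--             for i, v in enumerate(path_indices)]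
-- ===== Notes on version B (the rewrite author's own statement) =====
-- stated objective: alternative
-- what changed: B replaces A's in-place nested-while run scanning and stepped slice mutation by three staged passes: a forward scan computing each position's run-start index, a backward scan computing each position's run-end index, then an elementwise map that picks the clamped alternate whenever the position lies strictly inside its run at odd offset.
import Mathlib
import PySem

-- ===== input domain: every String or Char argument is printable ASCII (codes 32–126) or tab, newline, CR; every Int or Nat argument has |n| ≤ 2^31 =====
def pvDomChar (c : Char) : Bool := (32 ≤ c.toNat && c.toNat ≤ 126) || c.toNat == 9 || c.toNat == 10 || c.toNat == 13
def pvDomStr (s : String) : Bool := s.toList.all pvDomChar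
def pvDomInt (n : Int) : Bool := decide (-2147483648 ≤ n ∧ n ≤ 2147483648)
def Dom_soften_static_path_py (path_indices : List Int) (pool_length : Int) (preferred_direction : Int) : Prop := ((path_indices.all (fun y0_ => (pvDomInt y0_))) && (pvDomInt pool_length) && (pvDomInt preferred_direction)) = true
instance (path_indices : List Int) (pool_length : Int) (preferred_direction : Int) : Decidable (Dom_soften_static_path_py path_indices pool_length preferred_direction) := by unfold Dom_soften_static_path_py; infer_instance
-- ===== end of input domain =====

-- B replaces A's in-place run-scanning mutation by three staged passes (forward run-start
-- scan, backward run-end scan, elementwise map); objective: alternative (same O(n) cost).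

-- ===== PORT A =====
-- _clamp_pool_index
def clampA (index_value : Int) (pool_length : Int) : Int := max 0 (min (pool_length - 1) index_value)

-- inner 'while run_end < len(softened) and softened[run_end] == softened[run_start]'.
-- Indices are Nat: in A every index is a nonnegative in-range int, so getD is exact here.
def findRunEnd (s : List Int) (run_start : Nat) (run_end : Nat) : Nat :=
  if run_end < s.length ∧ s.getD run_end 0 = s.getD run_start 0 then findRunEnd s run_start (run_end + 1)
  else run_end
termination_by s.length - run_end
decreasing_by omega

-- 'for position in range(run_start + 1, run_end - 1, 2): softened[position] = alternate'
def setEvery2 (s : List Int) (pos : Nat) (stop : Nat) (alt : Int) : List Int :=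
  if pos < stop then setEvery2 (s.set pos alt) (pos + 2) stop alt else s
termination_by stop - pos
decreasing_by omega

-- needed by outerA's termination proof
theorem length_setEvery2 (s : List Int) (pos stop : Nat) (alt : Int) :
    (setEvery2 s pos stop alt).length = s.length := by
  unfold setEvery2
  split
  · rw [length_setEvery2]; simp
  · rfl
termination_by stop - pos
decreasing_by omega

-- needed by outerA's termination proof
theorem findRunEnd_ge (s : List Int) (run_start run_end : Nat) :
    run_end ≤ findRunEnd s run_start run_end := by
  unfold findRunEnd
  split
  · exact le_trans (by omega) (findRunEnd_ge s run_start (run_end + 1))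
  · exact le_rfl
termination_by s.length - run_end
decreasing_by omega

-- the outer 'while run_start < len(softened)' loop
def outerA (pool_length direction : Int) (s : List Int) (run_start : Nat) : List Int :=
  if h : run_start < s.length then
    let run_end := findRunEnd s run_start (run_start + 1)
    let run_length := run_end - run_start
    let s' :=
      if run_length > 2 then
        let base_index := s.getD run_start 0
        let alternate := clampA (base_index + direction) pool_length
        let alternate := if alternate = base_index then clampA (base_index - direction) pool_length else alternate
        if alternate ≠ base_index then setEvery2 s (run_start + 1) (run_end - 1) alternate else s
      else s
    outerA pool_length direction s' run_end
  else s
termination_by s.length - run_start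
decreasing_by
  have h1 : run_start + 1 ≤ findRunEnd s run_start (run_start + 1) := findRunEnd_ge s run_start (run_start + 1)
  have h2 : ∀ (t : List Int), t.length = s.length →
      t.length - findRunEnd s run_start (run_start + 1) < s.length - run_start := by
    intro t ht; omega
  apply h2
  split_ifs <;> first | rfl | exact length_setEvery2 _ _ _ _

def soften_static_path_py (path_indices : List Int) (pool_length : Int) (preferred_direction : Int) : List Int :=
  if path_indices.length < 3 then path_indices
  else
    let softened := path_indices
    let direction := if preferred_direction ≠ 0 then preferred_direction else 1
    outerA pool_length direction softened 0

-- ===== PORT B =====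
-- helper 'alternate(v)'
def altB (pool_length step v : Int) : Int :=
  let a := max 0 (min (pool_length - 1) (v + step))
  if a = v then max 0 (min (pool_length - 1) (v - step)) else a

-- pass 1: 'start.append(start[-1] if a[i] == a[i-1] else i)' as the structural recursion
-- carrying (previous value, previous start, current index)
def startsAux (prev : Int) (s : Nat) (i : Nat) : List Int → List Nat
  | [] => []
  | v :: t =>
      let s' := if v = prev then s else i
      s' :: startsAux v s' (i + 1) t

-- pass 2: the backward loop 'end[i] = end[i+1] if a[i] == a[i+1] else i' as the structural
-- recursion from the right (endsAux i v t = end-array of (v :: t) based at index i)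
def endsAux (i : Nat) (v : Int) : List Int → List Nat
  | [] => [i]
  | w :: t =>
      let r := endsAux (i + 1) w t
      (if v = w then r.headD i else i) :: r

def soften_static_path_py_alt (path_indices : List Int) (pool_length : Int) (preferred_direction : Int) : List Int :=
  if path_indices.length < 3 then path_indices
  else
    let step := if preferred_direction ≠ 0 then preferred_direction else 1
    match path_indices with
    | [] => []
    | v0 :: rest =>
      let starts := 0 :: startsAux v0 0 1 rest
      let ends := endsAux 0 v0 rest
      ((path_indices.zipIdx).zip (starts.zip ends)).map
        (fun q =>
          if q.2.1 < q.1.2 ∧ q.1.2 < q.2.2 ∧ (q.1.2 - q.2.1) % 2 = 1 ∧ altB pool_length step q.1.1 ≠ q.1.1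
          then altB pool_length step q.1.1 else q.1.1)

-- ===== PRECONDITION & SPEC =====
def Spec_soften_static_path_py (path_indices : List Int) (pool_length : Int) (preferred_direction : Int) (out : List Int) : Prop := out = soften_static_path_py_alt path_indices pool_length preferred_direction
instance (path_indices : List Int) (pool_length : Int) (preferred_direction : Int) (out : List Int) : Decidable (Spec_soften_static_path_py path_indices pool_length preferred_direction out) := by unfold Spec_soften_static_path_py; infer_instance

-- ===== CLAIM (what is proved, stated in full; the proofs are below) =====
def Claim_equal_soften_static_path_py : Prop := ∀ (path_indices : List Int) (pool_length : Int) (preferred_direction : Int), Dom_soften_static_path_py path_indices pool_length preferred_direction → Spec_soften_static_path_py path_indices pool_length preferred_direction (soften_static_path_py path_indices pool_length preferred_direction)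

-- ===== LEMMAS AND PROOFS =====

-- length of the leading run of value v
def runLen (v : Int) : List Int → Nat
  | [] => 0
  | x :: xs => if x = v then runLen v xs + 1 else 0

-- one softened run as a pattern
def emitRun (pool_length step v : Int) (L : Nat) : List Int :=
  (List.range L).map (fun i => if 0 < i ∧ i < L - 1 ∧ i % 2 = 1 then altB pool_length step v else v)

-- reference function: process the list run by run
def softRuns (pool_length direction : Int) : List Int → List Int
  | [] => []
  | v :: rest =>
      emitRun pool_length direction v (runLen v rest + 1) ++
        softRuns pool_length direction (rest.drop (runLen v rest))
termination_by t => t.length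
decreasing_by simp

theorem runLen_decomp (v : Int) (rest : List Int) :
    rest = List.replicate (runLen v rest) v ++ rest.drop (runLen v rest) := by
  induction rest with
  | nil => rfl
  | cons x xs ih =>
    by_cases hx : x = v
    · simp [runLen, hx, List.replicate_succ]
      exact ih
    · simp [runLen, hx]

theorem runLen_drop_head (v : Int) (rest : List Int) :
    (rest.drop (runLen v rest)).head? ≠ some v := by
  induction rest with
  | nil => simp
  | cons x xs ih =>
    by_cases hx : x = v
    · simp only [runLen, hx, if_pos]
      exact ih
    · simp [runLen, hx]

theorem setEvery2_getElem? (stop : Nat) : ∀ (pos : Nat) (s : List Int) (alt : Int) (j : Nat),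
    (setEvery2 s pos stop alt)[j]? =
      if pos ≤ j ∧ j < stop ∧ j < s.length ∧ (j - pos) % 2 = 0 then some alt else s[j]? := by
  intro pos s alt j
  unfold setEvery2
  split
  · rename_i hlt
    rw [setEvery2_getElem?]
    rw [List.getElem?_set]
    simp only [List.length_set]
    by_cases hj : j = pos
    · subst hj
      by_cases hl : j < s.length
      · simp [hl, hlt]
      · simp [hl, hlt]
    · have : ¬ (pos = j ∧ pos < s.length) := by omega
      split_ifs with c1 c2 c2 <;> simp_all <;> omega
  · rename_i hge
    have : ¬ (pos ≤ j ∧ j < stop ∧ j < s.length ∧ (j - pos) % 2 = 0) := by omega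
    simp [this]
termination_by pos => stop - pos
decreasing_by omega

-- getElem? of a three-part append with a replicate middle
theorem getElem?_mid (p : List Int) (L : Nat) (v : Int) (t2 : List Int) (j : Nat) :
    (p ++ (List.replicate L v ++ t2))[j]? =
      if j < p.length then p[j]?
      else if j < p.length + L then some v
      else t2[j - p.length - L]? := by
  by_cases h1 : j < p.length
  · simp [List.getElem?_append_left h1, h1]
  · have h1' : p.length ≤ j := by omega
    rw [List.getElem?_append_right h1']
    by_cases h2 : j < p.length + L
    · rw [List.getElem?_append_left (by simp; omega)]
      have hj2 : j - p.length < L := by omega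
      simp [hj2, h1, h2]
    · rw [List.getElem?_append_right (by simp; omega)]
      simp only [List.length_replicate]
      simp [h1, h2]

-- getElem? of the three-part append with a range-map middle
theorem getElem?_midmap (p : List Int) (L : Nat) (f : Nat → Int) (t2 : List Int) (j : Nat) :
    (p ++ ((List.range L).map f ++ t2))[j]? =
      if j < p.length then p[j]?
      else if j < p.length + L then some (f (j - p.length))
      else t2[j - p.length - L]? := by
  by_cases h1 : j < p.length
  · simp [List.getElem?_append_left h1, h1]
  · have h1' : p.length ≤ j := by omega
    rw [List.getElem?_append_right h1']
    by_cases h2 : j < p.length + L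
    · rw [List.getElem?_append_left (by simp; omega)]
      rw [List.getElem?_map]
      have hj2 : j - p.length < L := by omega
      simp [hj2, h1, h2]
    · rw [List.getElem?_append_right (by simp; omega)]
      simp only [List.length_range, List.length_map]
      simp [h1, h2]

-- the stepped update turns a run into the alternating pattern
theorem setEvery2_run (p : List Int) (L : Nat) (v : Int) (t2 : List Int) (alt : Int) :
    setEvery2 (p ++ (List.replicate L v ++ t2)) (p.length + 1) (p.length + L - 1) alt =
      p ++ ((List.range L).map (fun i => if 0 < i ∧ i < L - 1 ∧ i % 2 = 1 then alt else v) ++ t2) := by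
  apply List.ext_getElem?
  intro j
  rw [setEvery2_getElem?, getElem?_mid, getElem?_midmap]
  simp only [List.length_append, List.length_replicate]
  by_cases h1 : j < p.length
  · have : ¬ (p.length + 1 ≤ j) := by omega
    simp [h1, this]
  · by_cases h2 : j < p.length + L
    · by_cases h3 : p.length + 1 ≤ j ∧ j < p.length + L - 1 ∧ (j - (p.length + 1)) % 2 = 0
      · have hc : 0 < j - p.length ∧ j - p.length < L - 1 ∧ (j - p.length) % 2 = 1 := by omega
        have h3' : p.length + 1 ≤ j ∧ j < p.length + L - 1 ∧ j < p.length + (L + t2.length) ∧ (j - (p.length + 1)) % 2 = 0 := by omega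
        rw [if_pos h3', if_neg h1, if_pos h2, if_pos hc]
      · have hc : ¬ (0 < j - p.length ∧ j - p.length < L - 1 ∧ (j - p.length) % 2 = 1) := by omega
        have h3' : ¬ (p.length + 1 ≤ j ∧ j < p.length + L - 1 ∧ j < p.length + (L + t2.length) ∧ (j - (p.length + 1)) % 2 = 0) := by omega
        rw [if_neg h3', if_neg h1, if_pos h2, if_neg hc]
        simp [h1, h2]
    · have h3' : ¬ (p.length + 1 ≤ j ∧ j < p.length + L - 1 ∧ j < p.length + (L + t2.length) ∧ (j - (p.length + 1)) % 2 = 0) := by omega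
      rw [if_neg h3']
      simp [h1, h2]

-- the pattern collapses to the plain run when the alternate equals the value or the run is short
theorem patt_eq_replicate (v alt : Int) (L : Nat) (h : alt = v ∨ L ≤ 2) :
    (List.range L).map (fun i => if 0 < i ∧ i < L - 1 ∧ i % 2 = 1 then alt else v) =
      List.replicate L v := by
  apply List.ext_getElem
  · simp
  · intro i h1 h2
    simp only [List.getElem_map, List.getElem_range, List.getElem_replicate]
    rcases h with h | h
    · subst h; split <;> rfl
    · have hi : i < L := by simpa using h2
      have hn : ¬ (0 < i ∧ i < L - 1 ∧ i % 2 = 1) := by omega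
      simp [hn]

-- getD facts about the run region
theorem getD_run (p : List Int) (L : Nat) (v : Int) (t2 : List Int) (i : Nat) (hi : i < L) :
    (p ++ (List.replicate L v ++ t2)).getD (p.length + i) 0 = v := by
  simp only [List.getD, getElem?_mid]
  have h1 : ¬ (p.length + i < p.length) := by omega
  simp [h1, hi]

theorem getD_after (p : List Int) (L : Nat) (v : Int) (w : Int) (t2' : List Int) :
    (p ++ (List.replicate L v ++ (w :: t2'))).getD (p.length + L) 0 = w := by
  simp only [List.getD, getElem?_mid]
  have h1 : ¬ (p.length + L < p.length) := by omega
  simp [h1]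

-- the inner while finds the end of the run
theorem findRunEnd_run (p : List Int) (L : Nat) (v : Int) (t2 : List Int)
    (hhd : t2.head? ≠ some v) (hL : 1 ≤ L) :
    ∀ (d j : Nat), j + d = L → 1 ≤ j →
      findRunEnd (p ++ (List.replicate L v ++ t2)) p.length (p.length + j) = p.length + L := by
  intro d
  induction d with
  | zero =>
    intro j hj _
    have hjL : j = L := by omega
    rw [hjL]
    rw [findRunEnd]
    cases t2 with
    | nil =>
      have hcond : ¬ (p.length + L < (p ++ (List.replicate L v ++ ([] : List Int))).length ∧
          (p ++ (List.replicate L v ++ ([] : List Int))).getD (p.length + L) 0 =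
          (p ++ (List.replicate L v ++ ([] : List Int))).getD p.length 0) := by
        simp
      rw [if_neg hcond]
    | cons w t2' =>
      have hw : w ≠ v := by simpa using hhd
      have hv : (p ++ (List.replicate L v ++ (w :: t2'))).getD p.length 0 = v := by
        have := getD_run p L v (w :: t2') 0 (by omega); simpa using this
      have hcond : ¬ (p.length + L < (p ++ (List.replicate L v ++ (w :: t2'))).length ∧
          (p ++ (List.replicate L v ++ (w :: t2'))).getD (p.length + L) 0 =
          (p ++ (List.replicate L v ++ (w :: t2'))).getD p.length 0) := by
        intro hcon
        rw [getD_after, hv] at hcon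
        exact hw hcon.2
      rw [if_neg hcond]
  | succ d ih =>
    intro j hj hj1
    have hjL : j < L := by omega
    rw [findRunEnd]
    have hv : (p ++ (List.replicate L v ++ t2)).getD p.length 0 = v := by
      have := getD_run p L v t2 0 (by omega); simpa using this
    have hvj : (p ++ (List.replicate L v ++ t2)).getD (p.length + j) 0 = v :=
      getD_run p L v t2 j hjL
    have hc : (p.length + j < (p ++ (List.replicate L v ++ t2)).length ∧
        (p ++ (List.replicate L v ++ t2)).getD (p.length + j) 0 =
        (p ++ (List.replicate L v ++ t2)).getD p.length 0) := by
      constructor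
      · simp; omega
      · rw [hv, hvj]
    rw [if_pos hc]
    have : p.length + j + 1 = p.length + (j + 1) := by omega
    rw [this]
    exact ih (j + 1) (by omega) (by omega)

-- the outer loop, started past an arbitrary prefix, equals run-by-run processing
theorem outerA_run (pool_length direction : Int) :
    ∀ (n : Nat) (t p : List Int), t.length ≤ n →
      outerA pool_length direction (p ++ t) p.length = p ++ softRuns pool_length direction t := by
  intro n
  induction n with
  | zero =>
    intro t p ht
    have : t = [] := List.length_eq_zero_iff.mp (by omega)
    subst this
    rw [outerA]
    simp [softRuns]
  | succ n ih =>
    intro t p ht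
    match t with
    | [] =>
      rw [outerA]
      simp [softRuns]
    | v :: rest =>
      set r := runLen v rest with hr
      set L := r + 1 with hL
      set t2 := rest.drop r with ht2
      have hdec : (v :: rest) = List.replicate L v ++ t2 := by
        rw [hL, List.replicate_succ]
        simp only [List.cons_append, List.cons.injEq, true_and]
        rw [ht2, hr]
        exact runLen_decomp v rest
      have hhd : t2.head? ≠ some v := by rw [ht2, hr]; exact runLen_drop_head v rest
      have hlen : (v :: rest).length = L + t2.length := by
        rw [hdec]; simp
      have hfind : findRunEnd (p ++ (v :: rest)) p.length (p.length + 1) = p.length + L := by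
        rw [hdec]
        exact findRunEnd_run p L v t2 hhd (by omega) (L - 1) 1 (by omega) (by omega)
      have hbase : (p ++ (v :: rest)).getD p.length 0 = v := by
        rw [hdec]
        have := getD_run p L v t2 0 (by omega); simpa using this
      have ht2n : t2.length ≤ n := by
        have := hlen; simp at this; omega
      have hsoft : softRuns pool_length direction (v :: rest) =
          emitRun pool_length direction v L ++ softRuns pool_length direction t2 := by
        rw [softRuns]
      rw [outerA]
      rw [dif_pos (by simp : p.length < (p ++ (v :: rest)).length)]
      simp only [hfind, hbase]
      have hrl : p.length + L - p.length = L := by omega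
      rw [hrl]
      by_cases hgt : L > 2
      · rw [if_pos hgt]
        set alt0 := clampA (v + direction) pool_length with halt0
        set alt := if alt0 = v then clampA (v - direction) pool_length else alt0 with halt
        have haltB : altB pool_length direction v = alt := by
          rw [halt, halt0]; rfl
        have hemit : emitRun pool_length direction v L =
            (List.range L).map (fun i => if 0 < i ∧ i < L - 1 ∧ i % 2 = 1 then alt else v) := by
          rw [emitRun, haltB]
        by_cases hne : alt ≠ v
        · rw [if_pos hne]
          have hset : setEvery2 (p ++ (v :: rest)) (p.length + 1) (p.length + L - 1) alt =
              p ++ ((List.range L).map (fun i => if 0 < i ∧ i < L - 1 ∧ i % 2 = 1 then alt else v) ++ t2) := by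
            rw [hdec, ← List.append_assoc, List.append_assoc]
            exact setEvery2_run p L v t2 alt
          rw [hset]
          have hplen : p.length + L = (p ++ (List.range L).map (fun i => if 0 < i ∧ i < L - 1 ∧ i % 2 = 1 then alt else v)).length := by
            simp
          rw [hplen, ← List.append_assoc]
          rw [ih t2 _ ht2n]
          rw [hsoft, hemit]
          simp
        · rw [if_neg hne]
          rw [not_not] at hne
          have hplen : p.length + L = (p ++ List.replicate L v).length := by simp
          conv_lhs => rw [hdec, hplen, ← List.append_assoc]
          rw [ih t2 _ ht2n]
          rw [hsoft, hemit, patt_eq_replicate v alt L (Or.inl hne)]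
          simp
      · rw [if_neg hgt]
        have hplen : p.length + L = (p ++ List.replicate L v).length := by simp
        conv_lhs => rw [hdec, hplen, ← List.append_assoc]
        rw [ih t2 _ ht2n]
        rw [hsoft]
        have : emitRun pool_length direction v L = List.replicate L v := by
          rw [emitRun]
          exact patt_eq_replicate v _ L (Or.inr (by omega))
        rw [this]
        simp

-- B-side reference: run-level shape of the two scan arrays
def startsRun : Nat → List Int → List Nat
  | _, [] => []
  | i, v :: t =>
      List.replicate (runLen v t + 1) i ++ startsRun (i + runLen v t + 1) (t.drop (runLen v t))
termination_by _ t => t.length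
decreasing_by simp

def endsRun : Nat → List Int → List Nat
  | _, [] => []
  | i, v :: t =>
      List.replicate (runLen v t + 1) (i + runLen v t) ++ endsRun (i + runLen v t + 1) (t.drop (runLen v t))
termination_by _ t => t.length
decreasing_by simp

theorem startsAux_eq (l : List Int) : ∀ (prev : Int) (s i : Nat),
    startsAux prev s i l =
      List.replicate (runLen prev l) s ++ startsRun (i + runLen prev l) (l.drop (runLen prev l)) := by
  induction l with
  | nil => intro prev s i; simp [startsAux, runLen, startsRun]
  | cons v t ih =>
    intro prev s i
    by_cases hv : v = prev
    · subst hv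
      simp only [startsAux, runLen, if_true]
      rw [ih v s (i + 1)]
      simp only [List.replicate_succ, List.cons_append, List.drop_succ_cons]
      have h1 : i + 1 + runLen v t = i + (runLen v t + 1) := by omega
      rw [h1]
    · simp only [startsAux, runLen, if_neg hv]
      rw [ih v i (i + 1)]
      simp only [List.replicate_zero, List.nil_append, List.drop_zero]
      rw [startsRun]
      simp only [List.replicate_succ, List.cons_append, Nat.add_zero]
      have h1 : i + 1 + runLen v t = i + runLen v t + 1 := by omega
      rw [h1]

theorem endsAux_eq (t : List Int) : ∀ (i : Nat) (v : Int),
    endsAux i v t = endsRun i (v :: t) := by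
  induction t with
  | nil =>
    intro i v
    simp [endsAux, endsRun, runLen]
  | cons w t' ih =>
    intro i v
    by_cases hw : v = w
    · subst hw
      simp only [endsAux, if_true]
      rw [ih (i + 1) v]
      have hhead : (endsRun (i + 1) (v :: t')).headD i = i + 1 + runLen v t' := by
        rw [endsRun]
        simp [List.replicate_succ]
      rw [hhead]
      conv_rhs => rw [endsRun]
      rw [endsRun]
      simp only [runLen, if_true, List.drop_succ_cons,
        List.replicate_succ, List.cons_append]
      have h1 : i + (runLen v t' + 1) = i + 1 + runLen v t' := by omega
      rw [h1]
    · simp only [endsAux, if_neg hw]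
      rw [ih (i + 1) w]
      conv_rhs => rw [endsRun]
      have hwv : ¬ w = v := fun h => hw h.symm
      simp only [runLen, if_neg hwv, List.replicate_succ, Nat.add_zero, List.replicate_zero,
        List.drop_zero, List.cons_append, List.nil_append]

-- the aligned triple zip over one run is a range map
theorem zip_run_range (v : Int) : ∀ (L i0 s e : Nat),
    ((List.replicate L v).zipIdx i0).zip ((List.replicate L s).zip (List.replicate L e)) =
      (List.range L).map (fun off => ((v, i0 + off), (s, e))) := by
  intro L
  induction L with
  | zero => intro i0 s e; simp
  | succ L ih =>
    intro i0 s e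
    simp only [List.replicate_succ, List.zipIdx_cons, List.zip_cons_cons, List.range_succ_eq_map,
      List.map_cons, List.map_map]
    congr 1
    rw [ih (i0 + 1) s e]
    apply List.map_congr_left
    intro a _
    simp [Function.comp]
    omega

-- the elementwise decision over one run equals emitRun
theorem run_map_eq_emit (pool_length step v : Int) (r i0 : Nat) :
    (List.range (r + 1)).map (fun off =>
        if i0 < i0 + off ∧ i0 + off < i0 + r ∧ (i0 + off - i0) % 2 = 1 ∧ altB pool_length step v ≠ v
        then altB pool_length step v else v) = emitRun pool_length step v (r + 1) := by
  unfold emitRun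
  apply List.map_congr_left
  intro off hoff
  have hr : off < r + 1 := List.mem_range.mp hoff
  by_cases ha : altB pool_length step v = v
  · split_ifs <;> simp_all
  · have hiff : (i0 < i0 + off ∧ i0 + off < i0 + r ∧ (i0 + off - i0) % 2 = 1 ∧ altB pool_length step v ≠ v) ↔
        (0 < off ∧ off < r + 1 - 1 ∧ off % 2 = 1) := by
      constructor
      · intro h; omega
      · intro h; exact ⟨by omega, by omega, by omega, ha⟩
    rw [if_congr hiff rfl rfl]

-- B's triple-zip map equals run-by-run processing
theorem B_runs (pool_length step : Int) :
    ∀ (n : Nat) (l : List Int) (i0 : Nat), l.length ≤ n →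
      ((l.zipIdx i0).zip ((startsRun i0 l).zip (endsRun i0 l))).map
          (fun q =>
            if q.2.1 < q.1.2 ∧ q.1.2 < q.2.2 ∧ (q.1.2 - q.2.1) % 2 = 1 ∧ altB pool_length step q.1.1 ≠ q.1.1
            then altB pool_length step q.1.1 else q.1.1) =
        softRuns pool_length step l := by
  intro n
  induction n with
  | zero =>
    intro l i0 hl
    have : l = [] := List.length_eq_zero_iff.mp (by omega)
    subst this
    simp [startsRun, endsRun, softRuns]
  | succ n ih =>
    intro l i0 hl
    match l with
    | [] => simp [startsRun, endsRun, softRuns]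
    | v :: t =>
      set r := runLen v t with hr
      set L := r + 1 with hL
      set t2 := t.drop r with ht2
      have hdec : (v :: t) = List.replicate L v ++ t2 := by
        rw [hL, List.replicate_succ]
        simp only [List.cons_append, List.cons.injEq, true_and]
        rw [ht2, hr]
        exact runLen_decomp v t
      have hlen : (v :: t).length = L + t2.length := by rw [hdec]; simp
      have ht2n : t2.length ≤ n := by simp at hlen hl; omega
      have hstarts : startsRun i0 (v :: t) = List.replicate L i0 ++ startsRun (i0 + L) t2 := by
        rw [startsRun, ← hr, ← ht2, hL]
        have : i0 + r + 1 = i0 + (r + 1) := by omega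
        rw [this]
      have hends : endsRun i0 (v :: t) = List.replicate L (i0 + r) ++ endsRun (i0 + L) t2 := by
        rw [endsRun, ← hr, ← ht2, hL]
        have : i0 + r + 1 = i0 + (r + 1) := by omega
        rw [this]
      have hzipIdx : (v :: t).zipIdx i0 = (List.replicate L v).zipIdx i0 ++ t2.zipIdx (i0 + L) := by
        conv_lhs => rw [hdec]
        rw [List.zipIdx_append]
        simp
      rw [hstarts, hends, hzipIdx]
      rw [List.zip_append (by simp)]
      rw [List.zip_append (by simp)]
      rw [List.map_append]
      rw [zip_run_range, List.map_map]
      rw [ih t2 (i0 + L) ht2n]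
      have hrun : (List.range L).map
          ((fun q =>
            if q.2.1 < q.1.2 ∧ q.1.2 < q.2.2 ∧ (q.1.2 - q.2.1) % 2 = 1 ∧ altB pool_length step q.1.1 ≠ q.1.1
            then altB pool_length step q.1.1 else q.1.1) ∘ (fun off => ((v, i0 + off), (i0, i0 + r)))) =
          emitRun pool_length step v L := by
        rw [hL, ← run_map_eq_emit pool_length step v r i0]
        apply List.map_congr_left
        intro off _
        rfl
      rw [hrun]
      rw [softRuns, ← hr, ← ht2, ← hL]

-- ===== VERDICT (by name: the statement is the Claim_ definition above) =====
theorem soften_static_path_py_spec : Claim_equal_soften_static_path_py := by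
  unfold Claim_equal_soften_static_path_py Spec_soften_static_path_py
  intro path pool pref _
  by_cases hlen : path.length < 3
  · unfold soften_static_path_py soften_static_path_py_alt
    rw [if_pos hlen, if_pos hlen]
  · cases path with
    | nil => simp at hlen
    | cons v0 rest =>
      set step := if pref ≠ 0 then pref else 1 with hstep
      have hA : soften_static_path_py (v0 :: rest) pool pref =
          softRuns pool step (v0 :: rest) := by
        unfold soften_static_path_py
        rw [if_neg hlen]
        have h0 := outerA_run pool step (v0 :: rest).length (v0 :: rest) [] le_rfl
        simp only [List.nil_append, List.length_nil] at h0
        exact h0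
      have hstarts : (0 :: startsAux v0 0 1 rest) = startsRun 0 (v0 :: rest) := by
        rw [startsAux_eq]
        rw [startsRun]
        simp [List.replicate_succ]
        congr 1
        omega
      have hends : endsAux 0 v0 rest = endsRun 0 (v0 :: rest) := endsAux_eq rest 0 v0
      have hB : soften_static_path_py_alt (v0 :: rest) pool pref =
          softRuns pool step (v0 :: rest) := by
        unfold soften_static_path_py_alt
        rw [if_neg hlen]
        simp only [← hstep]
        rw [hstarts, hends]
        exact B_runs pool step (v0 :: rest).length (v0 :: rest) 0 le_rfl
      rw [hA, hB]
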